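-- pv_equiv track=rewrite | github.com/Danielhp95/Regym | regym/rl_loops/utils.py | compute_environments_per_agent
-- ===== SOURCE A (Python) =====
-- from typing import List, Tuple, Dict, Optional, Any
--
-- def compute_environments_per_agent(current_players) -> Dict[int, List[int]]:
--     ''' Dicionary where keys are agents and values are
--         the environments where they have just acted '''
--     environments_per_agent = {
--         a_i: [env_id
--               for env_id, player_i in enumerate(current_players)
--               if a_i == player_i]
--         for a_i in set(current_players)
--     }
--     return environments_per_agent
-- ===== SOURCE B (Python) =====
-- def compute_environments_per_agent(current_players):
--     ''' Dicionary where keys are agents and values are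
--         the environments where they have just acted '''
--     environments_per_agent = {}
--     for env_id, player in enumerate(current_players):
--         environments_per_agent.setdefault(player, []).append(env_id)
--     return environments_per_agent
-- ===== Notes on version B (the rewrite author's own statement) =====
-- stated objective: faster
-- what changed: Replaces A's per-agent rescan of the whole list (one full enumerate pass for every distinct player) with a single pass that appends each env_id into a dict entry via setdefault.
import Mathlib
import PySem

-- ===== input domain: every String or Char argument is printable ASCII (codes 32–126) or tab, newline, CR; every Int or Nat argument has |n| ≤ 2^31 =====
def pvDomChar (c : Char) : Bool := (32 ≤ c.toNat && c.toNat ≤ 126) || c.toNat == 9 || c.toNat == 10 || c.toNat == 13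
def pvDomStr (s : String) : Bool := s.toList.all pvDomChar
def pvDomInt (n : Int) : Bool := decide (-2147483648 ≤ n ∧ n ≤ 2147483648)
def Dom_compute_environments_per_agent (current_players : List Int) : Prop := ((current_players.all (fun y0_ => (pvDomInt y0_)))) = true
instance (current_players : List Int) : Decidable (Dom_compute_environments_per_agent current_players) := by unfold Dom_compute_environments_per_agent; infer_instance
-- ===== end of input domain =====

-- A builds the dict with one full scan of current_players per distinct player; B does one single
-- pass appending each env_id into its player's entry (objective: faster, one pass vs k passes).
-- Python A iterates set(current_players) (hash order) only to build the returned dict, which is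
-- compared ignoring order; the port uses first-occurrence order.

-- ===== PORT A =====
-- dict comprehension over set(current_players); keys are the distinct players, each value a
-- fresh filtered enumerate scan, so the dict's items list is exactly this map.
def compute_environments_per_agent (current_players : List Int) : List (Int × List Int) :=
  (PySem.Set.ofList current_players).map
    (fun a_i => (a_i,
      ((PySem.List.enumerate current_players).filter (fun p => a_i == p.2)).map (·.1)))

-- ===== PORT B =====
-- single pass: d.setdefault(player, []).append(env_id)  ==  d[player] = d.get(player, []) + [env_id]
def compute_environments_per_agent_alt (current_players : List Int) : List (Int × List Int) :=
  ((PySem.List.enumerate current_players).foldl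
    (fun d p => PySem.Dict.modify d p.2 [] (fun l => l ++ [p.1]))
    PySem.Dict.empty).items

-- ===== PRECONDITION & SPEC =====
def Spec_compute_environments_per_agent (current_players : List Int) (out : List (Int × List Int)) : Prop := out = compute_environments_per_agent_alt current_players
instance (current_players : List Int) (out : List (Int × List Int)) : Decidable (Spec_compute_environments_per_agent current_players out) := by unfold Spec_compute_environments_per_agent; infer_instance

-- ===== CLAIM (what is proved, stated in full; the proofs are below) =====
def Claim_equal_compute_environments_per_agent : Prop := ∀ (current_players : List Int), Dom_compute_environments_per_agent current_players → Spec_compute_environments_per_agent current_players (compute_environments_per_agent current_players)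

-- ===== LEMMAS AND PROOFS =====

-- the grouping loop keyed on p.2 with value p.1 (the prelude's getD_foldl_modify_append is keyed on p.1)
theorem getD_group_loop (l : List (Int × Int)) (d : PySem.Dict Int (List Int)) (c : Int) :
    ((l.foldl (fun d p => PySem.Dict.modify d p.2 [] (fun l => l ++ [p.1])) d).getD c []) =
      d.getD c [] ++ (l.filter (fun p => p.2 == c)).map (·.1) := by
  induction l generalizing d with
  | nil => simp
  | cons x xs ih =>
    simp only [List.foldl_cons, List.filter_cons, ih]
    rw [PySem.Dict.getD_modify]
    by_cases h : x.2 = c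
    · simp [h]
    · simp [Ne.symm h, (by simpa using h : (x.2 == c) = false)]

theorem keys_group_loop (cps : List Int) :
    ((PySem.List.enumerate cps).foldl
      (fun d p => PySem.Dict.modify d p.2 [] (fun l => l ++ [p.1])) PySem.Dict.empty).keys =
      PySem.Set.ofList cps := by
  rw [PySem.Dict.keys_foldl_modify_key (PySem.List.enumerate cps) (fun p => p.2) [] (fun _ p l => l ++ [p.1]) PySem.Dict.empty]
  simp [PySem.List.map_snd_enumerate, PySem.Set.update_nil_left]

-- ===== VERDICT (by name: the statement is the Claim_ definition above) =====
theorem compute_environments_per_agent_spec : Claim_equal_compute_environments_per_agent := by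
  intro cps _
  show _ = _
  unfold compute_environments_per_agent compute_environments_per_agent_alt
  rw [PySem.Dict.items_eq_map_keys _
        (by exact PySem.Dict.nodup_keys_foldl_modify_key (PySem.List.enumerate cps)
              (fun p => p.2) [] (fun _ p l => l ++ [p.1]) PySem.Dict.empty
              PySem.Dict.nodup_keys_empty) []]
  rw [keys_group_loop]
  refine List.map_congr_left (fun a _ => ?_)
  rw [getD_group_loop]
  simp only [PySem.Dict.getD_empty, List.nil_append]
  rw [List.filter_congr (l := PySem.List.enumerate cps)
        (fun p _ => (by simp [eq_comm] : (a == p.2) = (p.2 == a)))]
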